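-- pv_equiv track=rewrite | github.com/Mgobeaalcoba/python_fundamentals | Programación 1 - Verano 2021/Ejercicio 2 TP 3.py | crearmatrizb
-- ===== SOURCE A (Python) =====
-- def crearmatrizb(filas,columnas):
--     matriz=[]
--     for f in range(filas):
--         matriz.append([0]*columnas)
--     aux=1
--     f= -1
--     c= 1
--     while f >= filas*-1:
--         while (c-1) < columnas:
--             if abs(f) == c:
--                 matriz[f][c-1]=aux
--                 aux *= 3
--             c += 1
--         c = 1
--         f -= 1
--     return matriz
-- ===== SOURCE B (Python) =====
-- def crearmatrizb(filas, columnas):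
--     # Build each row directly: row r carries 3**c at its anti-diagonal column
--     # c = filas-1-r (when that column exists), zeros elsewhere.
--     return [[3 ** c if c == filas - 1 - r else 0 for c in range(columnas)]
--             for r in range(filas)]
-- ===== Notes on version B (the rewrite author's own statement) =====
-- stated objective: simpler
-- what changed: Replaces the zero-matrix build plus a nested while-loop scan (testing abs(f)==c on every cell and threading a running aux power) by a single nested comprehension that emits each cell's value in closed form (3**c exactly on the anti-diagonal column c = filas-1-r).
import Mathlib
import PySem

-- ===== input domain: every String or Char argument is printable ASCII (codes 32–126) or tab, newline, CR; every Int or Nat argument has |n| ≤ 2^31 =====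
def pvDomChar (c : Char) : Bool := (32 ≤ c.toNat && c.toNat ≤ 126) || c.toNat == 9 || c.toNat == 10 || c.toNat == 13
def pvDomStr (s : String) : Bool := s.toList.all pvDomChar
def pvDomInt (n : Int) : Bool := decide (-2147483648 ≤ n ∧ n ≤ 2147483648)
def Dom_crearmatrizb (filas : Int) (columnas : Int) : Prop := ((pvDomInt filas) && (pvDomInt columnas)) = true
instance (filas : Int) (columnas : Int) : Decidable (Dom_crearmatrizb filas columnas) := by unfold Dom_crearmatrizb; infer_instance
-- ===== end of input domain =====

-- B changes structure only (a closed-form nested comprehension instead of a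
-- zero-fill plus nested while scan); objective: simpler, no speed claim.

-- ===== PORT A =====
-- Python list assignment xs[i] = v (possibly negative i); the in-range guard is a
-- totality guard only — A never indexes out of range.
def pySetIdx {α : Type} (xs : List α) (i : Int) (v : α) : List α :=
  let j : Int := if i < 0 then i + xs.length else i
  if 0 ≤ j ∧ j < (xs.length : Int) then xs.set j.toNat v else xs

-- inner 'while (c-1) < columnas' loop; state = (matriz, aux)
def innerA (matriz : List (List Int)) (aux : Int) (f : Int) (c : Int) (columnas : Int) :
    List (List Int) × Int :=
  if h : c - 1 < columnas then
    if (f.natAbs : Int) = c then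
      innerA (pySetIdx matriz f (pySetIdx ((PySem.List.pyGet? matriz f).getD []) (c - 1) aux))
        (aux * 3) f (c + 1) columnas
    else
      innerA matriz aux f (c + 1) columnas
  else (matriz, aux)
termination_by (columnas - (c - 1)).toNat
decreasing_by all_goals omega

-- outer 'while f >= filas*-1' loop
def outerA (matriz : List (List Int)) (aux : Int) (f : Int) (filas : Int) (columnas : Int) :
    List (List Int) :=
  if h : f ≥ filas * (-1) then
    let p := innerA matriz aux f 1 columnas
    outerA p.1 p.2 (f - 1) filas columnas
  else matriz
termination_by (f - filas * (-1) + 1).toNat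
decreasing_by omega

def crearmatrizb (filas : Int) (columnas : Int) : List (List Int) :=
  let matriz := (PySem.List.pyRange 0 filas 1).foldl
    (fun m _ => m ++ [List.replicate columnas.toNat (0 : Int)]) []
  outerA matriz 1 (-1) filas columnas

-- ===== PORT B =====
def crearmatrizb_alt (filas : Int) (columnas : Int) : List (List Int) :=
  (PySem.List.pyRange 0 filas 1).map (fun r =>
    (PySem.List.pyRange 0 columnas 1).map (fun c =>
      if c = filas - 1 - r then 3 ^ c.toNat else 0))

-- ===== PRECONDITION & SPEC =====
def Spec_crearmatrizb (filas : Int) (columnas : Int) (out : List (List Int)) : Prop := out = crearmatrizb_alt filas columnas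
instance (filas : Int) (columnas : Int) (out : List (List Int)) : Decidable (Spec_crearmatrizb filas columnas out) := by unfold Spec_crearmatrizb; infer_instance

-- ===== CLAIM (what is proved, stated in full; the proofs are below) =====
def Claim_equal_crearmatrizb : Prop := ∀ (filas : Int) (columnas : Int), Dom_crearmatrizb filas columnas → Spec_crearmatrizb filas columnas (crearmatrizb filas columnas)

-- ===== LEMMAS AND PROOFS =====
theorem innerA_spec (f columnas : Int) (hf : f < 0) :
    ∀ (k : Nat) (c : Int), (columnas - c + 1).toNat = k → 1 ≤ c →
    ∀ (m : List (List Int)) (aux : Int),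
    innerA m aux f c columnas =
      if c ≤ -f ∧ -f ≤ columnas then
        (pySetIdx m f (pySetIdx ((PySem.List.pyGet? m f).getD []) (-f - 1) aux), aux * 3)
      else (m, aux) := by
  intro k
  induction k with
  | zero =>
    intro c hk hc m aux
    unfold innerA
    rw [dif_neg (by omega)]
    rw [if_neg (by omega)]
  | succ k ih =>
    intro c hk hc m aux
    unfold innerA
    by_cases hlt : c - 1 < columnas
    · rw [dif_pos hlt]
      by_cases habs : (f.natAbs : Int) = c
      · have hfc : -f = c := by omega
        rw [if_pos habs]
        rw [ih (c + 1) (by omega) (by omega)]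
        rw [if_neg (by omega)]
        rw [if_pos (by constructor <;> omega)]
        rw [hfc]
      · rw [if_neg habs]
        rw [ih (c + 1) (by omega) (by omega)]
        have : (c + 1 ≤ -f ∧ -f ≤ columnas) ↔ (c ≤ -f ∧ -f ≤ columnas) := by omega
        rw [if_congr this rfl rfl]
    · rw [dif_neg hlt]
      rw [if_neg (by omega)]

theorem outer_spec (columnas : Int) (n : Nat) :
    ∀ (k i : Nat), 1 ≤ i → i + k = n + 1 →
    ∀ (m : List (List Int)), m.length = n → ∀ (aux : Int),
    outerA m aux (-(i : Int)) (n : Int) columnas =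
      m.mapIdx (fun r row =>
        if r + i ≤ n ∧ ((n : Int) - r ≤ columnas)
        then pySetIdx row ((n : Int) - r - 1) (aux * 3 ^ (n - i - r)) else row) := by
  intro k
  induction k with
  | zero =>
    intro i hi hk m hm aux
    unfold outerA
    rw [dif_neg (by omega)]
    apply List.ext_getElem (by simp)
    intro r h1 h2
    simp only [List.getElem_mapIdx]
    rw [if_neg (by omega)]
  | succ k ih =>
    intro i hi hk m hm aux
    unfold outerA
    rw [dif_pos (by omega)]
    rw [innerA_spec (-(i:Int)) columnas (by omega) (columnas - 1 + 1).toNat 1 rfl (by omega)]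
    by_cases hcol : (i : Int) ≤ columnas
    · rw [if_pos (by constructor <;> omega)]
      dsimp only
      have hn : i ≤ n := by omega
      have hget : (PySem.List.pyGet? m (-(i:Int))).getD [] = m.getD (n - i) [] := by
        rw [PySem.List.pyGet?_neg_natCast m i (by omega) (by omega)]
        rw [List.getD_eq_getElem?_getD, hm]
      have hset : ∀ v, pySetIdx m (-(i:Int)) v = m.set (n - i) v := by
        intro v
        unfold pySetIdx
        dsimp only
        rw [if_pos (by push_cast [hm]; omega)]
        congr 1
        push_cast [hm]
        omega
      rw [hget, hset]
      rw [show -(i:Int) - 1 = -(((i+1 : Nat)) : Int) by push_cast; ring]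
      rw [ih (i+1) (by omega) (by omega) _ (by simp [hm]) (aux * 3)]
      apply List.ext_getElem (by simp)
      intro r h1 h2
      simp only [List.getElem_mapIdx, List.getElem_set]
      by_cases hr : n - i = r
      · rw [if_pos hr]
        rw [if_neg (by omega), if_pos (by constructor <;> omega)]
        have hgd : m.getD (n - i) [] = m[r] := by
          rw [hr, List.getD_eq_getElem?_getD, List.getElem?_eq_getElem (by simp at h1; omega)]
          rfl
        rw [hgd]
        congr 1
        · omega
        · rw [show n - i - r = 0 by omega]
          simp
      · rw [if_neg hr]
        by_cases hcond : r + i ≤ n ∧ ((n : Int) - r ≤ columnas)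
        · rw [if_pos (by constructor <;> omega), if_pos hcond]
          congr 1
          rw [show n - i - r = (n - (i+1) - r) + 1 by omega, pow_succ]
          ring
        · rw [if_neg (by omega), if_neg hcond]
    · rw [if_neg (by omega)]
      dsimp only
      rw [show -(i:Int) - 1 = -((i+1:Nat):Int) by push_cast; ring]
      rw [ih (i+1) (by omega) (by omega) m hm aux]
      apply List.ext_getElem (by simp)
      intro r h1 h2
      simp only [List.getElem_mapIdx]
      rw [if_neg (by omega), if_neg (by omega)]

theorem build_foldl (x : List Int) :
    ∀ (l : List Int) (acc : List (List Int)),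
    l.foldl (fun m _ => m ++ [x]) acc = acc ++ List.replicate l.length x := by
  intro l
  induction l with
  | nil => intro acc; simp
  | cons a l ih =>
    intro acc
    simp only [List.foldl_cons, List.length_cons, ih, List.replicate_succ]
    simp

theorem pySetIdx_nonneg {α : Type} (xs : List α) (i : Int) (v : α)
    (h0 : 0 ≤ i) (h1 : i < (xs.length : Int)) :
    pySetIdx xs i v = xs.set i.toNat v := by
  unfold pySetIdx
  rw [if_neg (by omega : ¬ i < 0)]
  dsimp only
  rw [if_pos ⟨h0, h1⟩]

theorem crearmatrizb_agrees (filas columnas : Int) :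
    crearmatrizb filas columnas = crearmatrizb_alt filas columnas := by
  unfold crearmatrizb crearmatrizb_alt
  dsimp only
  rw [build_foldl, List.nil_append, PySem.List.length_pyRange_one]
  by_cases hf : filas ≤ 0
  · rw [show (filas - 0).toNat = 0 by omega]
    rw [PySem.List.pyRange_one_eq_nil (by omega : filas ≤ 0)]
    unfold outerA
    rw [dif_neg (by omega)]
    simp
  · obtain ⟨n, hn⟩ : ∃ n : Nat, filas = (n : Int) := ⟨filas.toNat, by omega⟩
    subst hn
    rw [show ((n : Int) - 0).toNat = n by omega]
    rw [show (-1 : Int) = -((1 : Nat) : Int) by norm_num]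
    rw [outer_spec columnas n n 1 (by omega) (by omega) _ (by simp) 1]
    apply List.ext_getElem (by simp [PySem.List.length_pyRange_one])
    intro r h1 h2
    have hr : r < n := by simpa using h1
    simp only [List.getElem_mapIdx, List.getElem_replicate, List.getElem_map,
      PySem.List.getElem_pyRange_one]
    by_cases hcol : (n : Int) - (r : Int) ≤ columnas
    · rw [if_pos ⟨by omega, by simpa using hcol⟩]
      rw [pySetIdx_nonneg _ _ _ (by omega) (by simp; omega)]
      rw [show ((n : Int) - (r : Int) - 1).toNat = n - 1 - r by omega]
      apply List.ext_getElem (by simp [PySem.List.length_pyRange_one])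
      intro c hc1 hc2
      have hcn : c < columnas.toNat := by simpa using hc1
      simp only [List.getElem_set, List.getElem_replicate, List.getElem_map,
        PySem.List.getElem_pyRange_one]
      split_ifs with hA hB hB
      · rw [show ((0 : Int) + (c : Int)).toNat = c by omega, ← hA]
        simp
      · omega
      · omega
      · rfl
    · rw [if_neg (by intro h; exact hcol (by simpa using h.2))]
      apply List.ext_getElem (by simp [PySem.List.length_pyRange_one])
      intro c hc1 hc2
      have hcn : c < columnas.toNat := by simpa using hc1
      simp only [List.getElem_replicate, List.getElem_map, PySem.List.getElem_pyRange_one]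
      rw [if_neg (by omega)]

-- ===== VERDICT (by name: the statement is the Claim_ definition above) =====
theorem crearmatrizb_spec : Claim_equal_crearmatrizb := by
  intro filas columnas _
  exact crearmatrizb_agrees filas columnas
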